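-- pv_equiv track=rewrite | github.com/thlucas1/SmartInspectPython | SmartinspectPythonProject/smartinspectpython/silistviewercontext.py | EscapeLine
-- ===== SOURCE A (Python) =====
-- def EscapeLine(line:str, toEscape:str=None) -> str:
--     """
--     Escapes a line.
--
--     Args:
--         line (str):
--             The line to escape.
--         toEscape (str):
--             A set of characters which should be escaped in addition
--             to the newline characters, or an empty string if there are none.
--
--     Returns:
--         The escaped line.
--
--     This method ensures that the escaped line does not
--     contain characters listed in the toEscape parameter plus
--     any newline characters, such as the carriage return or
--     linefeed characters.
--     """
--     # if line is null or empty then nothing to do.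
--     if ((line == None) or (len(line) == 0)):
--         return line
--
--     if (toEscape == None):
--         toEscape = ""
--
--     b:chr = '\u0000'
--     result:str = ""
--
--     for i in range(len(line)):
--
--         c:chr = line[i]
--         if ((c == '\r') or (c == '\n')):
--
--             if ((b != '\r') and (b != '\n')):
--
--                 # newline characters need to be removed, as
--                 # they would break the list format.
--                 result += ' '
--
--         elif (toEscape.find(c) != -1):
--
--             # The current character needs to be escaped as
--             # well (with the \ character).
--             result += "\\"
--             result += c
--
--         else:
--
--             # This character is valid, so just append it.
--             result += c
--
--         b = c
--
--     return result
-- ===== SOURCE B (Python) =====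
-- def EscapeLine(line, toEscape=None):
--     # split-on-newline-runs + escape-each-part + join with single spaces
--     if line is None or len(line) == 0:
--         return line
--     esc = set(toEscape) if toEscape is not None else set()
--     parts = []
--     cur = []
--     prev_nl = False
--     for c in line:
--         if c == '\r' or c == '\n':
--             if not prev_nl:
--                 parts.append(cur)
--                 cur = []
--             prev_nl = True
--         else:
--             cur.append(c)
--             prev_nl = False
--     parts.append(cur)
--     escaped = [''.join('\\' + c if c in esc else c for c in p) for p in parts]
--     return ' '.join(escaped)
-- ===== Notes on version B (the rewrite author's own statement) =====
-- stated objective: alternative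
-- what changed: A is a single character-state-machine loop tracking the previous character; B instead splits the line into maximal newline-run-separated segments, escapes each segment independently (set membership instead of substring find), and joins the segments with single spaces.
import Mathlib
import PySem

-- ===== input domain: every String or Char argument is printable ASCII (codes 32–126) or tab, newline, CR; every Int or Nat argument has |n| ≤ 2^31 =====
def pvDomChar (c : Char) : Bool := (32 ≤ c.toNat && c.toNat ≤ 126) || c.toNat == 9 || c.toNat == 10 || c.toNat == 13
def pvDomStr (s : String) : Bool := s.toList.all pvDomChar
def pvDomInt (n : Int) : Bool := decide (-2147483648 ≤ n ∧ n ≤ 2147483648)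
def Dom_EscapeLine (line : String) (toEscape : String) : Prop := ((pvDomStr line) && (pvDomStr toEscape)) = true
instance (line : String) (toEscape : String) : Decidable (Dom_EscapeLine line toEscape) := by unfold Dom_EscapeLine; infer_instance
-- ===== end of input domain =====

-- B re-implements A's previous-character state machine as split-on-newline-runs / escape each segment / join with spaces; same return value, similar cost (objective: alternative).

-- ===== PORT A =====
-- A: one loop over the characters, carrying the previous character b and the accumulated result.
def EscapeLine (line : String) (toEscape : String) : String :=
  if PySem.Str.len line = 0 then line
  else
    let st := line.toList.foldl
      (fun (st : Char × List Char) c =>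
        let b := st.1
        let result := st.2
        let result :=
          if c = '\r' ∨ c = '\n' then
            if b ≠ '\r' ∧ b ≠ '\n' then result ++ [' '] else result
          else if PySem.Chars.find toEscape.toList [c] ≠ -1 then
            result ++ ['\\', c]
          else
            result ++ [c]
        (c, result))
      (Char.ofNat 0, [])
    String.ofList st.2

-- ===== PORT B =====
-- ' '.join of per-segment strings (Source B's join, ported by hand)
def joinSp : List (List Char) → List Char
  | [] => []
  | [p] => p
  | p :: q :: t => p ++ ' ' :: joinSp (q :: t)

-- ''.join('\'+c if c in esc else c for c in p)
def escPart (esc : PySem.Set Char) (p : List Char) : List Char :=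
  p.flatMap (fun c => if c ∈ esc then ['\\', c] else [c])

-- B: split line into maximal-newline-run separated segments, escape each, join with single spaces.
def EscapeLine_alt (line : String) (toEscape : String) : String :=
  if PySem.Str.len line = 0 then line
  else
    let esc : PySem.Set Char := PySem.Set.ofList toEscape.toList
    let st := line.toList.foldl
      (fun (st : List (List Char) × List Char × Bool) c =>
        let (parts, cur, prevNl) := st
        if c = '\r' ∨ c = '\n' then
          if prevNl then (parts, cur, true) else (parts ++ [cur], [], true)
        else (parts, cur ++ [c], false))
      ([], [], false)
    let parts := st.1 ++ [st.2.1]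
    String.ofList (joinSp (parts.map (escPart esc)))

-- ===== PRECONDITION & SPEC =====
def Spec_EscapeLine (line : String) (toEscape : String) (out : String) : Prop := out = EscapeLine_alt line toEscape
instance (line : String) (toEscape : String) (out : String) : Decidable (Spec_EscapeLine line toEscape out) := by unfold Spec_EscapeLine; infer_instance

-- ===== CLAIM (what is proved, stated in full; the proofs are below) =====
def Claim_equal_EscapeLine : Prop := ∀ (line : String) (toEscape : String), Dom_EscapeLine line toEscape → Spec_EscapeLine line toEscape (EscapeLine line toEscape)

-- ===== LEMMAS AND PROOFS =====

-- common specification: the escaped suffix, given whether the previous char was a newline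
def gSpec (esc : List Char) : List Char → Bool → List Char
  | [], _ => []
  | c :: t, prev =>
    if c = '\r' ∨ c = '\n' then
      (if prev then gSpec esc t true else ' ' :: gSpec esc t true)
    else (if c ∈ esc then ['\\', c] else [c]) ++ gSpec esc t false

lemma mem_of_find_singleton (s : List Char) (c : Char) :
    (PySem.Chars.find s [c] ≠ -1) ↔ c ∈ s := by
  rw [PySem.Chars.find_ne_neg_one_iff]
  constructor
  · rintro ⟨l, r, h⟩
    subst h; simp
  · intro h
    obtain ⟨l, r, h⟩ := List.append_of_mem h
    exact ⟨l, r, by simp [h]⟩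

lemma foldA_eq (toEscape : List Char) (l : List Char) :
    ∀ (b : Char) (res : List Char),
      (l.foldl
        (fun (st : Char × List Char) c =>
          let b := st.1
          let result := st.2
          let result :=
            if c = '\r' ∨ c = '\n' then
              if b ≠ '\r' ∧ b ≠ '\n' then result ++ [' '] else result
            else if PySem.Chars.find toEscape [c] ≠ -1 then
              result ++ ['\\', c]
            else
              result ++ [c]
          (c, result)) (b, res)).2
      = res ++ gSpec toEscape l (decide (b = '\r' ∨ b = '\n')) := by
  induction l with
  | nil => intro b res; simp [gSpec]
  | cons c t ih =>
    intro b res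
    simp only [List.foldl_cons, gSpec]
    by_cases hc : c = '\r' ∨ c = '\n'
    · by_cases hb : b = '\r' ∨ b = '\n'
      · have h1 : ¬ (b ≠ '\r' ∧ b ≠ '\n') := by tauto
        simp only [hc, hb, if_pos, if_neg h1, decide_true]
        rw [ih]
        simp [hc]
      · have h1 : (b ≠ '\r' ∧ b ≠ '\n') := by tauto
        simp only [hc, hb, if_pos, decide_false, if_pos h1]
        rw [ih]
        simp [hc]
    · rw [if_neg hc, if_neg hc]
      by_cases hm : c ∈ toEscape
      · rw [if_pos ((mem_of_find_singleton toEscape c).mpr hm), ih, if_pos hm]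
        simp [hc]
      · rw [if_neg (fun h => hm ((mem_of_find_singleton toEscape c).mp h)), ih, if_neg hm]
        simp [hc]

lemma joinSp_cons_of_ne_nil (p : List Char) {l : List (List Char)} (h : l ≠ []) :
    joinSp (p :: l) = p ++ ' ' :: joinSp l := by
  cases l with
  | nil => exact absurd rfl h
  | cons q t => rfl

lemma joinSp_snoc (m : List (List Char)) (z : List Char) (h : m ≠ []) :
    joinSp (m ++ [z]) = joinSp m ++ ' ' :: z := by
  induction m with
  | nil => exact absurd rfl h
  | cons p t ih =>
    cases t with
    | nil => rfl
    | cons q r =>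
      rw [List.cons_append, joinSp_cons_of_ne_nil p (by simp),
        joinSp_cons_of_ne_nil p (by simp), ih (by simp)]
      simp

lemma joinSp_snoc_append (m : List (List Char)) (x y : List Char) :
    joinSp (m ++ [x ++ y]) = joinSp (m ++ [x]) ++ y := by
  cases m with
  | nil => rfl
  | cons p t =>
    rw [joinSp_snoc _ _ (by simp), joinSp_snoc _ _ (by simp)]
    simp

lemma foldB_eq (esc : PySem.Set Char) (l : List Char) :
    ∀ (parts : List (List Char)) (cur : List Char) (prev : Bool),
      (joinSp (((l.foldl
        (fun (st : List (List Char) × List Char × Bool) c =>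
          let (parts, cur, prevNl) := st
          if c = '\r' ∨ c = '\n' then
            if prevNl then (parts, cur, true) else (parts ++ [cur], [], true)
          else (parts, cur ++ [c], false)) (parts, cur, prev)).1
        ++ [(l.foldl
        (fun (st : List (List Char) × List Char × Bool) c =>
          let (parts, cur, prevNl) := st
          if c = '\r' ∨ c = '\n' then
            if prevNl then (parts, cur, true) else (parts ++ [cur], [], true)
          else (parts, cur ++ [c], false)) (parts, cur, prev)).2.1]).map (escPart esc)))
      = joinSp ((parts ++ [cur]).map (escPart esc)) ++ gSpec esc l prev := by
  induction l with
  | nil => intro parts cur prev; simp [gSpec]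
  | cons c t ih =>
    intro parts cur prev
    simp only [List.foldl_cons, gSpec]
    by_cases hc : c = '\r' ∨ c = '\n'
    · rw [if_pos hc, if_pos hc]
      cases prev with
      | true => simp only [if_true]; rw [ih]
      | false =>
        simp only [Bool.false_eq_true, if_false]
        rw [ih]
        have hM : (List.map (escPart esc) (parts ++ [cur])) ≠ [] := by simp
        have hemp : escPart esc [] = [] := by simp [escPart]
        have h2 : joinSp (List.map (escPart esc) (parts ++ [cur] ++ [[]]))
            = joinSp (List.map (escPart esc) (parts ++ [cur])) ++ [' '] := by
          rw [List.map_append, List.map_singleton, hemp,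
            joinSp_snoc _ _ hM]
        rw [h2]
        simp
    · rw [if_neg hc, if_neg hc, ih]
      have h3 : joinSp (List.map (escPart esc) (parts ++ [cur ++ [c]]))
          = joinSp (List.map (escPart esc) (parts ++ [cur]))
            ++ (if c ∈ esc then ['\\', c] else [c]) := by
        rw [List.map_append, List.map_append, List.map_singleton,
          List.map_singleton]
        have hE : escPart esc (cur ++ [c])
            = escPart esc cur ++ (if c ∈ esc then ['\\', c] else [c]) := by
          simp [escPart]
        rw [hE, joinSp_snoc_append]
      rw [h3]
      simp

-- ===== VERDICT (by name: the statement is the Claim_ definition above) =====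
theorem EscapeLine_spec : Claim_equal_EscapeLine := by
  intro line toEscape _
  unfold Spec_EscapeLine EscapeLine EscapeLine_alt
  by_cases h : PySem.Str.len line = 0
  · rw [if_pos h, if_pos h]
  · rw [if_neg h, if_neg h]
    simp only []
    rw [foldA_eq, foldB_eq (PySem.Set.ofList toEscape.toList) line.toList [] [] false]
    have hmem : ∀ c : Char, (c ∈ PySem.Set.ofList toEscape.toList) ↔ c ∈ toEscape.toList :=
      fun c => PySem.Set.mem_ofList _ c
    have hsame : ∀ (l : List Char) (prev : Bool),
        gSpec toEscape.toList l prev = gSpec (PySem.Set.ofList toEscape.toList) l prev := by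
      intro l
      induction l with
      | nil => intro prev; rfl
      | cons c t ih =>
        intro prev
        simp only [gSpec, ih, hmem c]
    have hd : (decide ((Char.ofNat 0) = '\r' ∨ (Char.ofNat 0) = '\n')) = false := by decide
    rw [hsame, hd]
    simp [joinSp, escPart]
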